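-- pv_equiv track=rewrite | github.com/vgauraha62/airline-profitability-app | app.py | get_operational_recommendations
-- ===== SOURCE A (Python) =====
-- def get_operational_recommendations(importance_data):
--     operational_features = [
--         'Load Factor (%)', 'Aircraft Utilization (Hours/Day)',
--         'Fleet Availability (%)', 'Fuel Efficiency (ASK)'
--     ]
--
--     relevant_features = []
--     for feature in operational_features:
--         if any(feature in model_imps for model_imps in importance_data.values()):
--             relevant_features.append(feature)
--
--     return ", ".join(relevant_features[:2])
-- ===== SOURCE B (Python) =====
-- def get_operational_recommendations(importance_data):
--     # One pass over the data (loop interchange vs scanning per feature):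
--     # maintain a found-flag per fixed feature, stop early once all four are found.
--     a = b = c = d = False
--     for model_imps in importance_data.values():
--         a = a or 'Load Factor (%)' in model_imps
--         b = b or 'Aircraft Utilization (Hours/Day)' in model_imps
--         c = c or 'Fleet Availability (%)' in model_imps
--         d = d or 'Fuel Efficiency (ASK)' in model_imps
--         if a and b and c and d:
--             break
--     chosen = [name for flag, name in zip(
--         (a, b, c, d),
--         ('Load Factor (%)', 'Aircraft Utilization (Hours/Day)',
--          'Fleet Availability (%)', 'Fuel Efficiency (ASK)')) if flag]
--     return ", ".join(chosen[:2])
-- ===== Notes on version B (the rewrite author's own statement) =====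
-- stated objective: alternative
-- what changed: Interchanges the loops: instead of scanning all importance lists once per fixed feature, B makes a single pass over the data maintaining four found-flags with an early break once all are set, then assembles the answer from the flags.
import Mathlib
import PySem

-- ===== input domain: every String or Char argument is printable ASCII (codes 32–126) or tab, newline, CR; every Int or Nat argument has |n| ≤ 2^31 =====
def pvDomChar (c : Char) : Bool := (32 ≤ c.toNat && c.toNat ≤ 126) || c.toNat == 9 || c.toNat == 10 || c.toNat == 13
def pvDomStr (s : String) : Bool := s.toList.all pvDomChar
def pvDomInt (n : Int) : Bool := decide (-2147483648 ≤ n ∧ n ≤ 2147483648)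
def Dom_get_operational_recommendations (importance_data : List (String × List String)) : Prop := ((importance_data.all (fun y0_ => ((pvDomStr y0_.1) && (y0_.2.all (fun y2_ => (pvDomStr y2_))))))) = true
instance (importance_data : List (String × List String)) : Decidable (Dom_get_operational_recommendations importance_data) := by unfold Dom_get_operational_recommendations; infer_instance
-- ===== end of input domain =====

-- B interchanges the loops: one pass over the data with four found-flags and an early
-- break once all are set, instead of one scan of all value lists per fixed feature.

-- ===== PORT A =====
def get_operational_recommendations (importance_data : List (String × List String)) : String :=
  let operational_features : List String :=
    ["Load Factor (%)", "Aircraft Utilization (Hours/Day)",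
     "Fleet Availability (%)", "Fuel Efficiency (ASK)"]
  let relevant_features : List String :=
    operational_features.foldl (fun acc feature =>
      if (importance_data.map Prod.snd).any (fun model_imps => model_imps.contains feature)
      then acc ++ [feature] else acc) []
  PySem.Str.join ", " (PySem.List.slice relevant_features none (some 2))

-- ===== PORT B =====
-- the single pass over the value lists, updating four flags, breaking when all are set
def pvFlagLoop : List (List String) → Bool → Bool → Bool → Bool → Bool × Bool × Bool × Bool
  | [], a, b, c, d => (a, b, c, d)
  | v :: rest, a, b, c, d =>
    let a' := a || v.contains "Load Factor (%)"
    let b' := b || v.contains "Aircraft Utilization (Hours/Day)"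
    let c' := c || v.contains "Fleet Availability (%)"
    let d' := d || v.contains "Fuel Efficiency (ASK)"
    if a' && b' && c' && d' then (a', b', c', d') else pvFlagLoop rest a' b' c' d'

def get_operational_recommendations_alt (importance_data : List (String × List String)) : String :=
  let (a, b, c, d) := pvFlagLoop (importance_data.map Prod.snd) false false false false
  let chosen : List String :=
    (((List.zip [a, b, c, d]
        ["Load Factor (%)", "Aircraft Utilization (Hours/Day)",
         "Fleet Availability (%)", "Fuel Efficiency (ASK)"]).filter (fun p => p.1)).map (fun p => p.2))
  PySem.Str.join ", " (PySem.List.slice chosen none (some 2))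

-- ===== PRECONDITION & SPEC =====
def Spec_get_operational_recommendations (importance_data : List (String × List String)) (out : String) : Prop := out = get_operational_recommendations_alt importance_data
instance (importance_data : List (String × List String)) (out : String) : Decidable (Spec_get_operational_recommendations importance_data out) := by unfold Spec_get_operational_recommendations; infer_instance

-- ===== CLAIM (what is proved, stated in full; the proofs are below) =====
def Claim_equal_get_operational_recommendations : Prop := ∀ (importance_data : List (String × List String)), Dom_get_operational_recommendations importance_data → Spec_get_operational_recommendations importance_data (get_operational_recommendations importance_data)

-- ===== LEMMAS AND PROOFS =====

-- the early-exit flag loop computes, per feature, "initial flag or some list contains it"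
theorem pvFlagLoop_spec (l : List (List String)) (a b c d : Bool) :
    pvFlagLoop l a b c d =
      (a || l.any (fun v => v.contains "Load Factor (%)"),
       b || l.any (fun v => v.contains "Aircraft Utilization (Hours/Day)"),
       c || l.any (fun v => v.contains "Fleet Availability (%)"),
       d || l.any (fun v => v.contains "Fuel Efficiency (ASK)")) := by
  induction l generalizing a b c d with
  | nil => simp [pvFlagLoop]
  | cons v rest ih =>
    simp only [pvFlagLoop, List.any_cons]
    split
    · rename_i h
      simp only [Bool.and_eq_true] at h
      obtain ⟨⟨⟨ha, hb⟩, hc⟩, hd⟩ := h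
      simp only [← Bool.or_assoc, ha, hb, hc, hd, Bool.true_or]
    · rw [ih]
      simp [Bool.or_assoc]

theorem get_operational_recommendations_spec : Claim_equal_get_operational_recommendations := by
  intro imp _
  show _ = _
  unfold get_operational_recommendations get_operational_recommendations_alt
  simp only [PySem.List.foldl_append_if_eq_filter, List.nil_append, pvFlagLoop_spec,
    Bool.false_or, List.zip_cons_cons, List.zip_nil_left, List.filter_cons, List.filter_nil,
    List.map_cons, List.map_nil]
  cases h1 : (imp.map Prod.snd).any (fun v => v.contains "Load Factor (%)") <;>
  cases h2 : (imp.map Prod.snd).any (fun v => v.contains "Aircraft Utilization (Hours/Day)") <;>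
  cases h3 : (imp.map Prod.snd).any (fun v => v.contains "Fleet Availability (%)") <;>
  cases h4 : (imp.map Prod.snd).any (fun v => v.contains "Fuel Efficiency (ASK)") <;>
  simp [h1, h2, h3, h4]
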